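-- pv_equiv track=rewrite | github.com/ucbepic/TWIX | twix/pattern.py | block_seperation
-- ===== SOURCE A (Python) =====
-- def block_seperation(rls, row_align):
--     #rls: row_id -> row label, the node_id is relative index, starting from 0
--     blk = {}  # bid -> a list of row id
--     blk_type = {}  # store the name per block: bid-> type of block
--     bid = 0
--     row_2_blk = {}  # row id -> blk type
--
--     # merge consecutive kv pairs into one kv block
--
--     for id, label in rls.items():
--         if(label == 'K'):
--             blk[bid] = []
--             blk[bid].append(id)
--             blk_type[bid] = 'table'
--             row_2_blk[id] = bid
--             bid += 1
--         elif(label == 'V'):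
--             i = id - 1
--             while(i >= 0):  # find the cloest aligned key row of row with index id
--                 if(rls[i] == 'K' and row_align[(i, id)] == 1):
--                     key_blk_id = row_2_blk[i]
--                     blk[key_blk_id].append(id)
--                     break
--                 i -= 1
--         elif(label == 'KV'):
--             if(id - 1 >= 0 and rls[id-1] != 'KV'):
--                 # Initialize a new block if it doesn't exist
--                 if bid not in blk:
--                     blk[bid] = []
--             # Initialize bid in blk if it doesn't exist
--             if bid not in blk:
--                 blk[bid] = []
--             blk[bid].append(id)
--             blk_type[bid] = 'kv'
--             if(id + 1 < len(rls) and (rls[id+1] == 'K' or rls[id+1] == 'V')):  # if next row is K or V, create a new block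
--                 bid += 1
--
--
--     for bid, name in blk_type.items():
--         # if a table block only has one row, change it to be M
--         if(name == 'table'):
--             if(len(blk[bid]) == 1):
--                 blk_type[bid] = 'metadata'
--     return blk, blk_type
-- ===== SOURCE B (Python) =====
-- def block_seperation(rls, row_align):
--     # Pass 1: K and KV rows build the blocks.
--     n = len(rls)
--     blk = {}
--     blk_type = {}
--     row_2_blk = {}
--     bid = 0
--     for id, label in rls.items():
--         if label == 'K':
--             blk[bid] = [id]
--             blk_type[bid] = 'table'
--             row_2_blk[id] = bid
--             bid += 1
--         elif label == 'KV':
--             blk[bid] = blk.get(bid, []) + [id]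
--             blk_type[bid] = 'kv'
--             if id + 1 < n and rls.get(id + 1) in ('K', 'V'):
--                 bid += 1
--     # Pass 2: each V row joins the block of its highest-numbered aligned key row.
--     for id, label in rls.items():
--         if label == 'V':
--             ks = [i for i in rls
--                   if 0 <= i < id and rls[i] == 'K' and row_align.get((i, id)) == 1]
--             if ks:
--                 blk[row_2_blk[max(ks)]].append(id)
--     # A table block with a single row is metadata.
--     for b, name in blk_type.items():
--         if name == 'table' and len(blk[b]) == 1:
--             blk_type[b] = 'metadata'
--     return blk, blk_type
-- ===== Notes on version B (the rewrite author's own statement) =====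
-- stated objective: alternative
-- what changed: A's single interleaved loop with a backward while-scan per V row is replaced by two passes: pass 1 builds K/KV blocks (direct list construction, no contains-guards), pass 2 attaches each V row by filtering the key set for aligned preceding K rows and taking their maximum instead of scanning indices backward one by one.
import Mathlib
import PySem

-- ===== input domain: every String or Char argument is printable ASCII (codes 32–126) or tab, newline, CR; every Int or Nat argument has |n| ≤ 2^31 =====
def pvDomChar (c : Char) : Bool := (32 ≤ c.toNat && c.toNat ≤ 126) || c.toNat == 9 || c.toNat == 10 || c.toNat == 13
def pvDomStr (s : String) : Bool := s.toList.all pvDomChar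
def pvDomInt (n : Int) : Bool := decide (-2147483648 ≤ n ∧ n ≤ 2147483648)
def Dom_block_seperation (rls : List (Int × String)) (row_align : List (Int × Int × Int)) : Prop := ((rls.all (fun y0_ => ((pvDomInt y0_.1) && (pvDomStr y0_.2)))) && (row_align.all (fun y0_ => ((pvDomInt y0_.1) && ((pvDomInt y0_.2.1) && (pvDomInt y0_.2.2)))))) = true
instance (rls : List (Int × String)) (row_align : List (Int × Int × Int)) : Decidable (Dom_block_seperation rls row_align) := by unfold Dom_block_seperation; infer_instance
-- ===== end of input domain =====

-- B replaces A's interleaved loop (with an index-by-index backward while-scan per V row) by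
-- two recursive passes: pass 1 builds K/KV blocks, pass 2 attaches each V row to the block of
-- the MAXIMUM aligned preceding key row, found by filtering the key set; objective: alternative.

-- ===== PORT A =====

-- A's inner `while i >= 0` loop: walks downward, appends `id` to the block of the closest
-- aligned key row and stops.  Python raises KeyError where a lookup returns `none`;
-- those inputs are excluded by Pre_ and the port just stops there.
def pvScanA (d : PySem.Dict Int String) (a : PySem.Dict (Int × Int) Int)
    (r2b : PySem.Dict Int Int) (blk : PySem.Dict Int (List Int)) (id : Int) (i : Int) :
    PySem.Dict Int (List Int) :=
  if i < 0 then blk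
  else
    match d.get? i with
    | none => blk                    -- Python: KeyError rls[i] (outside Pre_)
    | some lbl =>
      if lbl = "K" then
        match a.get? (i, id) with
        | none => blk                -- Python: KeyError row_align[(i,id)] (outside Pre_)
        | some v =>
          if v = 1 then
            match r2b.get? i with
            | none => blk            -- Python: KeyError row_2_blk[i] (outside Pre_)
            | some b => blk.modify b [] (fun l => l ++ [id])
          else pvScanA d a r2b blk id (i - 1)
      else pvScanA d a r2b blk id (i - 1)
termination_by (i + 1).toNat
decreasing_by all_goals omega

-- one iteration of A's main `for id, label in rls.items()` loop; state = (blk, blk_type, bid, row_2_blk)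
def pvStepA (d : PySem.Dict Int String) (a : PySem.Dict (Int × Int) Int)
    (s : (PySem.Dict Int (List Int)) × (PySem.Dict Int String) × Int × (PySem.Dict Int Int))
    (row : Int × String) :
    (PySem.Dict Int (List Int)) × (PySem.Dict Int String) × Int × (PySem.Dict Int Int) :=
  match s, row with
  | (blk, bt, bid, r2b), (id, lbl) =>
    if lbl = "K" then
      ((blk.insert bid []).modify bid [] (fun l => l ++ [id]),
       bt.insert bid "table", bid + 1, r2b.insert id bid)
    else if lbl = "V" then
      (pvScanA d a r2b blk id (id - 1), bt, bid, r2b)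
    else if lbl = "KV" then
      -- `rls[id-1]` can raise in Python (outside Pre_); getD's default "" ≠ "KV" is harmless there
      let blk1 := if 0 ≤ id - 1 ∧ ¬ (d.getD (id - 1) "" = "KV") then
                    (if blk.contains bid then blk else blk.insert bid []) else blk
      let blk2 := if blk1.contains bid then blk1 else blk1.insert bid []
      let blk3 := blk2.modify bid [] (fun l => l ++ [id])
      (blk3, bt.insert bid "kv",
       if id + 1 < (d.size : Int) ∧ (d.getD (id + 1) "" = "K" ∨ d.getD (id + 1) "" = "V")
       then bid + 1 else bid,
       r2b)
    else (blk, bt, bid, r2b)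

-- A's trailing loop: a 'table' block with exactly one row becomes 'metadata'
def pvMetaA (blk : PySem.Dict Int (List Int)) (bt : PySem.Dict Int String) :
    PySem.Dict Int String :=
  bt.items.foldl
    (fun acc p => if p.2 = "table" ∧ (blk.getD p.1 []).length = 1 then acc.insert p.1 "metadata" else acc)
    bt

def block_seperation (rls : List (Int × String)) (row_align : List (Int × Int × Int)) :
    (List (Int × List Int)) × (List (Int × String)) :=
  let d := PySem.Dict.ofList rls
  let a := PySem.Dict.ofList (row_align.map (fun t => ((t.1, t.2.1), t.2.2)))
  match d.items.foldl (pvStepA d a) (PySem.Dict.mk [], PySem.Dict.mk [], 0, PySem.Dict.mk []) with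
  | (blk, bt, _, _) => (blk.items, (pvMetaA blk bt).items)

-- ===== PORT B =====

-- B's comprehension: the aligned preceding key rows of V row `id`
def pvKs (d : PySem.Dict Int String) (a : PySem.Dict (Int × Int) Int) (id : Int) : List Int :=
  d.keys.filter (fun i =>
    decide (0 ≤ i) && decide (i < id) && (d.get? i == some "K") && (a.get? (i, id) == some 1))

-- B's first pass: K and KV rows build the blocks (recursion over the item list)
def pvPass1 (d : PySem.Dict Int String) (n : Int) :
    List (Int × String) → PySem.Dict Int (List Int) → PySem.Dict Int String → Int →
    PySem.Dict Int Int →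
    (PySem.Dict Int (List Int)) × (PySem.Dict Int String) × Int × (PySem.Dict Int Int)
  | [], blk, bt, bid, r2b => (blk, bt, bid, r2b)
  | (id, lbl) :: rest, blk, bt, bid, r2b =>
    if lbl = "K" then
      pvPass1 d n rest (blk.insert bid [id]) (bt.insert bid "table") (bid + 1) (r2b.insert id bid)
    else if lbl = "KV" then
      pvPass1 d n rest (blk.insert bid (blk.getD bid [] ++ [id])) (bt.insert bid "kv")
        (if id + 1 < n ∧ (d.getD (id + 1) "") ∈ (["K", "V"] : List String) then bid + 1 else bid)
        r2b
    else pvPass1 d n rest blk bt bid r2b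

-- B's second pass: each V row joins the block of max(ks) (recursion over the item list);
-- `row_2_blk[max(ks)]` / `blk[...]` KeyErrors cannot occur inside Pre_, the port falls through
def pvPass2 (d : PySem.Dict Int String) (a : PySem.Dict (Int × Int) Int)
    (r2b : PySem.Dict Int Int) :
    List (Int × String) → PySem.Dict Int (List Int) → PySem.Dict Int (List Int)
  | [], blk => blk
  | (id, lbl) :: rest, blk =>
    if lbl = "V" then
      match PySem.List.max? (pvKs d a id) (fun x => x) with
      | none => pvPass2 d a r2b rest blk
      | some m =>
        match r2b.get? m with
        | none => pvPass2 d a r2b rest blk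
        | some b => pvPass2 d a r2b rest (blk.modify b [] (fun l => l ++ [id]))
    else pvPass2 d a r2b rest blk

-- B's trailing loop, as recursion over the blk_type items
def pvMeta2 (blk : PySem.Dict Int (List Int)) :
    List (Int × String) → PySem.Dict Int String → PySem.Dict Int String
  | [], bt => bt
  | (b, name) :: rest, bt =>
    pvMeta2 blk rest
      (if name = "table" ∧ (blk.getD b []).length = 1 then bt.insert b "metadata" else bt)

def block_seperation_alt (rls : List (Int × String)) (row_align : List (Int × Int × Int)) :
    (List (Int × List Int)) × (List (Int × String)) :=
  let d := PySem.Dict.ofList rls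
  let a := PySem.Dict.ofList (row_align.map (fun t => ((t.1, t.2.1), t.2.2)))
  let s := pvPass1 d (d.size : Int) d.items (PySem.Dict.mk []) (PySem.Dict.mk []) 0 (PySem.Dict.mk [])
  let blk2 := pvPass2 d a s.2.2.2 d.items s.1
  (blk2.items, (pvMeta2 blk2 s.2.1.items s.2.1).items)

-- ===== PRECONDITION & SPEC =====

-- row i is the closest aligned key row candidate for V row id
def pvBreakAt (d : PySem.Dict Int String) (a : PySem.Dict (Int × Int) Int) (id i : Int) : Bool :=
  d.get? i == some "K" && a.get? (i, id) == some 1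

-- the downward scan from V row id stays inside the dict and, at its break row, the key row
-- was iterated before the V row (all within a window of size |d|+1, which the scan cannot leave)
def pvVOk (d : PySem.Dict Int String) (a : PySem.Dict (Int × Int) Int) (id : Int) : Bool :=
  (PySem.List.pyRange (max 0 (id - ((d.size : Int) + 1))) id 1).all (fun i =>
    (PySem.List.pyRange (max 0 (id - ((d.size : Int) + 1))) id 1).any
        (fun k => decide (i < k) && pvBreakAt d a id k) ||
    ((d.get? i).isSome &&
     (!(d.get? i == some "K") || (a.get? (i, id)).isSome) &&
     (!(pvBreakAt d a id i) || decide (List.idxOf i d.keys < List.idxOf id d.keys))))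

def pvPre (rls : List (Int × String)) (row_align : List (Int × Int × Int)) : Bool :=
  let d := PySem.Dict.ofList rls
  let a := PySem.Dict.ofList (row_align.map (fun t => ((t.1, t.2.1), t.2.2)))
  d.items.all (fun p =>
    (!(p.2 == "KV") ||
      ((!(decide (1 ≤ p.1)) || (d.get? (p.1 - 1)).isSome) &&
       (!(decide (p.1 + 1 < (d.size : Int))) || (d.get? (p.1 + 1)).isSome))) &&
    (!(p.2 == "V") || pvVOk d a p.1))

-- Pre_ excludes exactly the inputs on which Python A raises a KeyError: a KV row whose
-- neighbour lookup rls[id-1] / rls[id+1] misses, or a V row whose downward scan hits a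
-- missing rls[i] / row_align[(i,id)] / row_2_blk[i] key.
def Pre_block_seperation (rls : List (Int × String)) (row_align : List (Int × Int × Int)) : Prop :=
  pvPre rls row_align = true

instance (rls : List (Int × String)) (row_align : List (Int × Int × Int)) :
    Decidable (Pre_block_seperation rls row_align) := by
  unfold Pre_block_seperation; infer_instance

def pvWitness_block_seperation : (List (Int × String)) × (List (Int × Int × Int)) :=
  ([(0, "K"), (1, "V"), (2, "KV")], [(0, 1, 1)])

def Spec_block_seperation (rls : List (Int × String)) (row_align : List (Int × Int × Int))
    (out : (List (Int × List Int)) × (List (Int × String))) : Prop :=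
  out = block_seperation_alt rls row_align

instance (rls : List (Int × String)) (row_align : List (Int × Int × Int))
    (out : (List (Int × List Int)) × (List (Int × String))) :
    Decidable (Spec_block_seperation rls row_align out) := by
  unfold Spec_block_seperation; infer_instance

-- ===== CLAIM (what is proved, stated in full; the proofs are below) =====
def Claim_equal_block_seperation : Prop := ∀ (rls : List (Int × String)) (row_align : List (Int × Int × Int)), Dom_block_seperation rls row_align → Pre_block_seperation rls row_align → Spec_block_seperation rls row_align (block_seperation rls row_align)

-- ===== LEMMAS AND PROOFS =====

-- A's backward scan, abstracted to return the target block id instead of updating blk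
def pvFindB (d : PySem.Dict Int String) (a : PySem.Dict (Int × Int) Int)
    (r2b : PySem.Dict Int Int) (id : Int) (i : Int) : Option Int :=
  if i < 0 then none
  else
    match d.get? i with
    | none => none
    | some lbl =>
      if lbl = "K" then
        match a.get? (i, id) with
        | none => none
        | some v => if v = 1 then r2b.get? i else pvFindB d a r2b id (i - 1)
      else pvFindB d a r2b id (i - 1)
termination_by (i + 1).toNat
decreasing_by all_goals omega

-- the effect of one V-row append, as a function of the optional target block
def pvApp1 (blk : PySem.Dict Int (List Int)) (id : Int) (o : Option Int) :
    PySem.Dict Int (List Int) :=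
  match o with
  | some b => blk.modify b [] (fun l => l ++ [id])
  | none => blk

-- pending V-appends, applied in order
def pvApply (pend : List (Int × Int)) (blk : PySem.Dict Int (List Int)) :
    PySem.Dict Int (List Int) :=
  pend.foldl (fun bk p => bk.modify p.1 [] (fun l => l ++ [p.2])) blk

-- B's pass 1, one iteration, as a foldl step (pvPass1 is this fold; see pvPass1_eq)
def pvStepB (d : PySem.Dict Int String)
    (s : (PySem.Dict Int (List Int)) × (PySem.Dict Int String) × Int × (PySem.Dict Int Int))
    (row : Int × String) :
    (PySem.Dict Int (List Int)) × (PySem.Dict Int String) × Int × (PySem.Dict Int Int) :=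
  match s, row with
  | (blk, bt, bid, r2b), (id, lbl) =>
    if lbl = "K" then
      (blk.insert bid [id], bt.insert bid "table", bid + 1, r2b.insert id bid)
    else if lbl = "KV" then
      (blk.modify bid [] (fun l => l ++ [id]), bt.insert bid "kv",
       if id + 1 < (d.size : Int) ∧ (d.getD (id + 1) "" = "K" ∨ d.getD (id + 1) "" = "V")
       then bid + 1 else bid,
       r2b)
    else (blk, bt, bid, r2b)

-- B's pass 2, one iteration, as a foldl step (pvPass2 is this fold; see pvPass2_eq)
def pvStepV (d : PySem.Dict Int String) (a : PySem.Dict (Int × Int) Int)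
    (r2b : PySem.Dict Int Int) (blk : PySem.Dict Int (List Int)) (row : Int × String) :
    PySem.Dict Int (List Int) :=
  if row.2 = "V" then
    pvApp1 blk row.1 ((PySem.List.max? (pvKs d a row.1) (fun x => x)).bind r2b.get?)
  else blk

-- the V-append a row contributes (w.r.t. the row_2_blk state at that moment)
def pvDelta (d : PySem.Dict Int String) (a : PySem.Dict (Int × Int) Int)
    (s : (PySem.Dict Int (List Int)) × (PySem.Dict Int String) × Int × (PySem.Dict Int Int))
    (row : Int × String) : List (Int × Int) :=
  if row.2 = "V" then
    match pvFindB d a s.2.2.2 row.1 (row.1 - 1) with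
    | some b => [(b, row.1)]
    | none => []
  else []

-- B's first pass instrumented with the list of pending V-appends
def pvStepC (d : PySem.Dict Int String) (a : PySem.Dict (Int × Int) Int)
    (s : ((PySem.Dict Int (List Int)) × (PySem.Dict Int String) × Int × (PySem.Dict Int Int)) × List (Int × Int))
    (row : Int × String) :
    ((PySem.Dict Int (List Int)) × (PySem.Dict Int String) × Int × (PySem.Dict Int Int)) × List (Int × Int) :=
  (pvStepB d s.1 row, s.2 ++ pvDelta d a s.1 row)

-- ---- B's recursions are folds ----

theorem pvPass1_eq (d : PySem.Dict Int String) :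
    ∀ (l : List (Int × String)) (blk : PySem.Dict Int (List Int)) (bt : PySem.Dict Int String)
      (bid : Int) (r2b : PySem.Dict Int Int),
      pvPass1 d (d.size : Int) l blk bt bid r2b = l.foldl (pvStepB d) (blk, bt, bid, r2b) := by
  intro l
  induction l with
  | nil => intro blk bt bid r2b; rfl
  | cons row rest ih =>
    intro blk bt bid r2b
    obtain ⟨id, lbl⟩ := row
    rw [List.foldl_cons]
    by_cases hK : lbl = "K"
    · rw [pvPass1, if_pos hK, ih]
      simp [pvStepB, hK]
    · by_cases hKV : lbl = "KV"
      · rw [pvPass1, if_neg hK, if_pos hKV, ih]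
        have hmem : ((d.getD (id + 1) "") ∈ (["K", "V"] : List String))
            ↔ (d.getD (id + 1) "" = "K" ∨ d.getD (id + 1) "" = "V") := by
          simp
        have hmod : blk.insert bid (blk.getD bid [] ++ [id])
            = blk.modify bid [] (fun l => l ++ [id]) := rfl
        simp only [pvStepB, if_neg hK, if_pos hKV, hmod]
        congr 3
        by_cases hc : id + 1 < (d.size : Int) ∧ (d.getD (id + 1) "" = "K" ∨ d.getD (id + 1) "" = "V")
        · rw [if_pos ⟨hc.1, hmem.mpr hc.2⟩, if_pos hc]
        · rw [if_neg (fun h => hc ⟨h.1, hmem.mp h.2⟩), if_neg hc]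
      · rw [pvPass1, if_neg hK, if_neg hKV, ih]
        simp [pvStepB, hK, hKV]

theorem pvPass2_eq (d : PySem.Dict Int String) (a : PySem.Dict (Int × Int) Int)
    (r2b : PySem.Dict Int Int) :
    ∀ (l : List (Int × String)) (blk : PySem.Dict Int (List Int)),
      pvPass2 d a r2b l blk = l.foldl (pvStepV d a r2b) blk := by
  intro l
  induction l with
  | nil => intro blk; rfl
  | cons row rest ih =>
    intro blk
    obtain ⟨id, lbl⟩ := row
    rw [List.foldl_cons]
    by_cases hV : lbl = "V"
    · subst hV
      rw [pvPass2, if_pos rfl]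
      cases hm : PySem.List.max? (pvKs d a id) (fun x => x) with
      | none =>
        have hs : pvStepV d a r2b blk (id, "V") = blk := by
          simp [pvStepV, hm, pvApp1]
        dsimp only
        rw [hs]
        exact ih blk
      | some m =>
        dsimp only
        cases hr : r2b.get? m with
        | none =>
          have hs : pvStepV d a r2b blk (id, "V") = blk := by
            simp [pvStepV, hm, hr, pvApp1]
          dsimp only
          rw [hs]
          exact ih blk
        | some b =>
          have hs : pvStepV d a r2b blk (id, "V") = blk.modify b [] (fun l => l ++ [id]) := by
            simp [pvStepV, hm, hr, pvApp1]
          dsimp only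
          rw [hs]
          exact ih _
    · rw [pvPass2, if_neg hV, ih]
      simp [pvStepV, hV]

theorem pvMeta2_eq (blk : PySem.Dict Int (List Int)) :
    ∀ (l : List (Int × String)) (bt : PySem.Dict Int String),
      pvMeta2 blk l bt = l.foldl
        (fun acc p => if p.2 = "table" ∧ (blk.getD p.1 []).length = 1 then acc.insert p.1 "metadata" else acc)
        bt := by
  intro l
  induction l with
  | nil => intro bt; rfl
  | cons p rest ih =>
    intro bt
    obtain ⟨b, name⟩ := p
    rw [List.foldl_cons, pvMeta2, ih]

-- ---- Dict commutation toolbox ----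

theorem pv_insert_insert_comm {v2 : Type} (d : PySem.Dict Int v2) {j k : Int} (v w : v2)
    (hj : d.contains j = true) (hne : j ≠ k) :
    (d.insert k v).insert j w = (d.insert j w).insert k v := by
  have hj' : (d.insert k v).contains j = true := by
    rw [PySem.Dict.contains_insert]; simp [hj]
  have hkj : ((d.insert j w).contains k) = d.contains k := by
    rw [PySem.Dict.contains_insert]
    have : (k == j) = false := by simp; exact fun h => hne h.symm
    simp [this]
  have kj : k ≠ j := fun h => hne h.symm
  apply PySem.Dict.ext
  by_cases hk : d.contains k = true
  · rw [PySem.Dict.items_insert_of_contains _ _ hj',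
        PySem.Dict.items_insert_of_contains _ _ hk,
        PySem.Dict.items_insert_of_contains _ _ (hkj ▸ hk),
        PySem.Dict.items_insert_of_contains _ _ hj]
    rw [List.map_map, List.map_map]
    apply List.map_congr_left
    intro p _
    by_cases h1 : p.1 = k
    · have h2 : ¬ p.1 = j := by rw [h1]; exact kj
      simp [Function.comp, h1, kj]
    · by_cases h2 : p.1 = j
      · simp [Function.comp, h2, hne]
      · simp [Function.comp, h1, h2]
  · have hk' : d.contains k = false := by simpa using hk
    rw [PySem.Dict.items_insert_of_contains _ _ hj',
        PySem.Dict.items_insert_of_not_contains _ _ hk',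
        PySem.Dict.items_insert_of_not_contains _ _ (hkj ▸ hk'),
        PySem.Dict.items_insert_of_contains _ _ hj]
    rw [List.map_append]
    simp [kj]

theorem pv_modify_insert_comm {v2 : Type} (d : PySem.Dict Int v2) {j k : Int} (v d0 : v2)
    (f : v2 → v2) (hj : d.contains j = true) (hne : j ≠ k) :
    (d.insert k v).modify j d0 f = (d.modify j d0 f).insert k v := by
  show (d.insert k v).insert j (f ((d.insert k v).getD j d0)) = _
  rw [PySem.Dict.getD_insert_of_ne _ _ _ hne]
  exact pv_insert_insert_comm d v _ hj hne

theorem pv_modify_modify_comm {v2 : Type} (d : PySem.Dict Int v2) {j k : Int}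
    (d0 d1 : v2) (f g : v2 → v2) (hj : d.contains j = true) (hne : j ≠ k) :
    (d.modify k d0 g).modify j d1 f = (d.modify j d1 f).modify k d0 g := by
  show (d.insert k (g (d.getD k d0))).modify j d1 f
      = (d.modify j d1 f).insert k (g ((d.modify j d1 f).getD k d0))
  have : (d.modify j d1 f).getD k d0 = d.getD k d0 := by
    show (d.insert j (f (d.getD j d1))).getD k d0 = _
    exact PySem.Dict.getD_insert_of_ne _ _ _ (fun h => hne h.symm)
  rw [this]
  exact pv_modify_insert_comm d _ _ _ hj hne

theorem pv_apply_insert (pend : List (Int × Int)) :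
    ∀ (blk : PySem.Dict Int (List Int)) (k : Int) (v : List Int),
      (∀ p ∈ pend, blk.contains p.1 = true ∧ p.1 ≠ k) →
      pvApply pend (blk.insert k v) = (pvApply pend blk).insert k v := by
  induction pend with
  | nil => intro _ _ _ _; rfl
  | cons q rest ih =>
    intro blk k v hp
    obtain ⟨hq, hqk⟩ := hp q (by simp)
    have comm : (blk.insert k v).modify q.1 [] (fun l => l ++ [q.2])
        = (blk.modify q.1 [] (fun l => l ++ [q.2])).insert k v :=
      pv_modify_insert_comm blk v [] _ hq hqk
    have hrest : ∀ p ∈ rest, (blk.modify q.1 [] (fun l => l ++ [q.2])).contains p.1 = true ∧ p.1 ≠ k := by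
      intro p hpm
      obtain ⟨h1, h2⟩ := hp p (by simp [hpm])
      refine ⟨?_, h2⟩
      rw [PySem.Dict.contains_modify]
      simp [h1]
    have := ih (blk.modify q.1 [] (fun l => l ++ [q.2])) k v hrest
    simpa [pvApply, comm] using this

theorem pv_apply_modify (pend : List (Int × Int)) :
    ∀ (blk : PySem.Dict Int (List Int)) (k : Int) (d0 : List Int) (f : List Int → List Int),
      (∀ p ∈ pend, blk.contains p.1 = true ∧ p.1 ≠ k) →
      pvApply pend (blk.modify k d0 f) = (pvApply pend blk).modify k d0 f := by
  induction pend with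
  | nil => intro _ _ _ _ _; rfl
  | cons q rest ih =>
    intro blk k d0 f hp
    obtain ⟨hq, hqk⟩ := hp q (by simp)
    have comm : (blk.modify k d0 f).modify q.1 [] (fun l => l ++ [q.2])
        = (blk.modify q.1 [] (fun l => l ++ [q.2])).modify k d0 f :=
      pv_modify_modify_comm blk d0 [] _ _ hq hqk
    have hrest : ∀ p ∈ rest, (blk.modify q.1 [] (fun l => l ++ [q.2])).contains p.1 = true ∧ p.1 ≠ k := by
      intro p hpm
      obtain ⟨h1, h2⟩ := hp p (by simp [hpm])
      refine ⟨?_, h2⟩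
      rw [PySem.Dict.contains_modify]
      simp [h1]
    have := ih (blk.modify q.1 [] (fun l => l ++ [q.2])) k d0 f hrest
    simpa [pvApply, comm] using this

theorem pv_apply_append (p1 p2 : List (Int × Int)) (blk : PySem.Dict Int (List Int)) :
    pvApply (p1 ++ p2) blk = pvApply p2 (pvApply p1 blk) :=
  List.foldl_append

-- ---- A's scan computes pvFindB's append ----

theorem pv_scan_eq_find (d : PySem.Dict Int String) (a : PySem.Dict (Int × Int) Int)
    (r2b : PySem.Dict Int Int) (id : Int) :
    ∀ (n : Nat) (i : Int), (i + 1).toNat ≤ n → ∀ blk,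
      pvScanA d a r2b blk id i = pvApp1 blk id (pvFindB d a r2b id i) := by
  intro n
  induction n with
  | zero =>
    intro i hi blk
    have h0 : i < 0 := by omega
    rw [pvScanA, pvFindB]
    simp [h0, pvApp1]
  | succ n ih =>
    intro i hi blk
    rw [pvScanA, pvFindB]
    by_cases h0 : i < 0
    · simp [h0, pvApp1]
    · simp only [if_neg h0]
      cases hd : d.get? i with
      | none => simp [pvApp1]
      | some lbl =>
        by_cases hK : lbl = "K"
        · simp only [if_pos hK]
          cases ha : a.get? (i, id) with
          | none => simp [pvApp1]
          | some v =>
            by_cases hv : v = 1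
            · simp only [if_pos hv]
              cases r2b.get? i <;> simp [pvApp1]
            · simp only [if_neg hv]
              exact ih (i - 1) (by omega) blk
        · simp only [if_neg hK]
          exact ih (i - 1) (by omega) blk

theorem pv_find_mem (d : PySem.Dict Int String) (a : PySem.Dict (Int × Int) Int)
    (r2b : PySem.Dict Int Int) (id : Int) :
    ∀ (n : Nat) (i : Int), (i + 1).toNat ≤ n → ∀ b,
      pvFindB d a r2b id i = some b → b ∈ r2b.values := by
  intro n
  induction n with
  | zero =>
    intro i hi b h
    have h0 : i < 0 := by omega
    rw [pvFindB] at h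
    simp [h0] at h
  | succ n ih =>
    intro i hi b h
    rw [pvFindB] at h
    by_cases h0 : i < 0
    · simp [h0] at h
    · simp only [if_neg h0] at h
      cases hd : d.get? i with
      | none => rw [hd] at h; simp at h
      | some lbl =>
        rw [hd] at h
        by_cases hK : lbl = "K"
        · simp only [if_pos hK] at h
          cases ha : a.get? (i, id) with
          | none => rw [ha] at h; simp at h
          | some v =>
            rw [ha] at h
            by_cases hv : v = 1
            · simp only [if_pos hv] at h
              exact List.mem_map.mpr ⟨(i, b), PySem.Dict.mem_items_of_get?_eq_some r2b h, rfl⟩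
            · simp only [if_neg hv] at h
              exact ih (i - 1) (by omega) b h
        · simp only [if_neg hK] at h
          exact ih (i - 1) (by omega) b h

-- ---- the backward scan equals B's filter-and-max selection ----

theorem pv_mem_pvKs (d : PySem.Dict Int String) (a : PySem.Dict (Int × Int) Int) (id i : Int) :
    i ∈ pvKs d a id ↔
      i ∈ d.keys ∧ 0 ≤ i ∧ i < id ∧ d.get? i = some "K" ∧ a.get? (i, id) = some 1 := by
  unfold pvKs
  rw [List.mem_filter]
  simp [and_assoc]

theorem pv_match_mem_keys (d : PySem.Dict Int String) (i : Int) (lbl : String)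
    (h : d.get? i = some lbl) : i ∈ d.keys := by
  by_contra hni
  rw [(PySem.Dict.get?_eq_none_iff_not_mem_keys d i).mpr hni] at h
  simp at h

-- descend from i to the break row m, all intermediate rows readable and non-matching
theorem pv_find_break (d : PySem.Dict Int String) (a : PySem.Dict (Int × Int) Int)
    (r2b : PySem.Dict Int Int) (id m : Int)
    (hm : d.get? m = some "K" ∧ a.get? (m, id) = some 1) (hm0 : 0 ≤ m) :
    ∀ (n : Nat) (i : Int), (i + 1).toNat ≤ n → m ≤ i →
      (∀ j, m < j → j ≤ i →
        (∃ lbl, d.get? j = some lbl ∧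
          (lbl = "K" → ∃ v, a.get? (j, id) = some v ∧ v ≠ 1))) →
      pvFindB d a r2b id i = r2b.get? m := by
  intro n
  induction n with
  | zero => intro i hi hmi _; omega
  | succ n ih =>
    intro i hi hmi hsafe
    rw [pvFindB]
    by_cases hme : i = m
    · subst hme
      simp only [if_neg (by omega : ¬ i < 0), hm.1, if_pos rfl, hm.2]
      simp
    · have hlt : m < i := by omega
      obtain ⟨lbl, hl, himp⟩ := hsafe i hlt (le_refl i)
      simp only [if_neg (by omega : ¬ i < 0), hl]
      by_cases hK : lbl = "K"
      · obtain ⟨v, hv, hvne⟩ := himp hK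
        simp only [if_pos hK, hv, if_neg hvne]
        exact ih (i - 1) (by omega) (by omega) (fun j h1 h2 => hsafe j h1 (by omega))
      · simp only [if_neg hK]
        exact ih (i - 1) (by omega) (by omega) (fun j h1 h2 => hsafe j h1 (by omega))

-- descend all the way to -1 when no row matches
theorem pv_find_none (d : PySem.Dict Int String) (a : PySem.Dict (Int × Int) Int)
    (r2b : PySem.Dict Int Int) (id : Int) :
    ∀ (n : Nat) (i : Int), (i + 1).toNat ≤ n →
      (∀ j, 0 ≤ j → j ≤ i →
        (∃ lbl, d.get? j = some lbl ∧
          (lbl = "K" → ∃ v, a.get? (j, id) = some v ∧ v ≠ 1))) →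
      pvFindB d a r2b id i = none := by
  intro n
  induction n with
  | zero =>
    intro i hi _
    rw [pvFindB]
    simp [show i < 0 by omega]
  | succ n ih =>
    intro i hi hsafe
    rw [pvFindB]
    by_cases h0 : i < 0
    · simp [h0]
    · obtain ⟨lbl, hl, himp⟩ := hsafe i (by omega) (le_refl i)
      simp only [if_neg h0, hl]
      by_cases hK : lbl = "K"
      · obtain ⟨v, hv, hvne⟩ := himp hK
        simp only [if_pos hK, hv, if_neg hvne]
        exact ih (i - 1) (by omega) (fun j h1 h2 => hsafe j h1 (by omega))
      · simp only [if_neg hK]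
        exact ih (i - 1) (by omega) (fun j h1 h2 => hsafe j h1 (by omega))

-- pvVOk gives per-row safety; extract the usable pieces at a window row
theorem pv_vok_at (d : PySem.Dict Int String) (a : PySem.Dict (Int × Int) Int) (id : Int)
    (hvok : pvVOk d a id = true)
    (hnomatch : ∀ k, k ∈ PySem.List.pyRange (max 0 (id - ((d.size : Int) + 1))) id 1 →
      pvBreakAt d a id k = false) :
    ∀ j, j ∈ PySem.List.pyRange (max 0 (id - ((d.size : Int) + 1))) id 1 →
      (d.get? j).isSome = true ∧
      (d.get? j = some "K" → (a.get? (j, id)).isSome = true) := by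
  intro j hj
  rw [pvVOk, List.all_eq_true] at hvok
  have hv := hvok j hj
  have hany : ((PySem.List.pyRange (max 0 (id - ((d.size : Int) + 1))) id 1).any
      (fun k => decide (j < k) && pvBreakAt d a id k)) = false := by
    rw [List.any_eq_false]
    intro k hk
    rw [hnomatch k hk]
    simp
  rw [hany, Bool.false_or, Bool.and_eq_true, Bool.and_eq_true] at hv
  refine ⟨hv.1.1, fun hK => ?_⟩
  have h2 := hv.1.2
  rw [hK] at h2
  simpa using h2

-- if the whole window is readable, its rows are keys, so the window cannot have full width
theorem pv_window_bottom (d : PySem.Dict Int String) (a : PySem.Dict (Int × Int) Int) (id : Int)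
    (hnd : d.keys.Nodup)
    (hsafe : ∀ j, j ∈ PySem.List.pyRange (max 0 (id - ((d.size : Int) + 1))) id 1 →
      (d.get? j).isSome = true) :
    max 0 (id - ((d.size : Int) + 1)) = 0 ∨ id ≤ 0 := by
  by_contra hc
  push_neg at hc
  obtain ⟨hw, hid⟩ := hc
  have hwpos : 0 < id - ((d.size : Int) + 1) := by omega
  have hsub : PySem.List.pyRange (max 0 (id - ((d.size : Int) + 1))) id 1 ⊆ d.keys := by
    intro x hx
    have := hsafe x hx
    cases hg : d.get? x with
    | none => rw [hg] at this; exact absurd this (by simp)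
    | some lbl => exact pv_match_mem_keys d x lbl hg
  have hlen := ((PySem.List.nodup_pyRange_one _ id).subperm hsub).length_le
  rw [PySem.List.length_pyRange_one] at hlen
  have hklen : d.keys.length = d.size := by simp [PySem.Dict.keys, PySem.Dict.size]
  rw [hklen] at hlen
  omega

-- main bridge: A's backward scan returns exactly row_2_blk at max(ks)
theorem pv_find_eq_max (d : PySem.Dict Int String) (a : PySem.Dict (Int × Int) Int)
    (r2b : PySem.Dict Int Int) (id : Int)
    (hnd : d.keys.Nodup) (hvok : pvVOk d a id = true) :
    pvFindB d a r2b id (id - 1)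
      = (PySem.List.max? (pvKs d a id) (fun x => x)).bind r2b.get? := by
  cases hm : PySem.List.max? (pvKs d a id) (fun x => x) with
  | none =>
    have hnil : pvKs d a id = [] := (PySem.List.max?_eq_none_iff _ _).mp hm
    have hnomatch : ∀ k, 0 ≤ k → k < id → pvBreakAt d a id k = false := by
      intro k hk0 hkid
      by_contra hb
      have hb' : pvBreakAt d a id k = true := by simpa using hb
      rw [pvBreakAt, Bool.and_eq_true, beq_iff_eq, beq_iff_eq] at hb'
      have : k ∈ pvKs d a id := (pv_mem_pvKs d a id k).mpr
        ⟨pv_match_mem_keys d k _ hb'.1, hk0, hkid, hb'.1, hb'.2⟩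
      rw [hnil] at this
      simp at this
    have hnomatchW : ∀ k, k ∈ PySem.List.pyRange (max 0 (id - ((d.size : Int) + 1))) id 1 →
        pvBreakAt d a id k = false := by
      intro k hk
      rw [PySem.List.mem_pyRange_one] at hk
      exact hnomatch k (by omega) hk.2
    have hsafeW := pv_vok_at d a id hvok hnomatchW
    rcases pv_window_bottom d a id hnd (fun j hj => (hsafeW j hj).1) with hw | hid
    · simp only [Option.bind]
      apply pv_find_none d a r2b id ((id - 1) + 1).toNat (id - 1) (le_refl _)
      intro j hj0 hji
      have hjW : j ∈ PySem.List.pyRange (max 0 (id - ((d.size : Int) + 1))) id 1 := by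
        rw [PySem.List.mem_pyRange_one, hw]
        omega
      obtain ⟨h1, h2⟩ := hsafeW j hjW
      cases hg : d.get? j with
      | none => rw [hg] at h1; exact absurd h1 (by simp)
      | some lbl =>
        refine ⟨lbl, rfl, fun hK => ?_⟩
        subst hK
        have := h2 hg
        cases ha : a.get? (j, id) with
        | none => rw [ha] at this; exact absurd this (by simp)
        | some v =>
          refine ⟨v, rfl, fun hv1 => ?_⟩
          subst hv1
          have : pvBreakAt d a id j = true := by
            rw [pvBreakAt, hg, ha]; simp
          rw [hnomatch j hj0 (by omega)] at this
          exact Bool.noConfusion this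
    · rw [pvFindB]
      simp [show id - 1 < 0 by omega, Option.bind]
  | some m =>
    have hmm := (pv_mem_pvKs d a id m).mp (PySem.List.max?_mem hm)
    obtain ⟨hmk, hm0, hmid, hmK, hma⟩ := hmm
    have hmax : ∀ y ∈ pvKs d a id, y ≤ m := fun y hy => PySem.List.max?_isMax hm y hy
    have hnomatch : ∀ j, m < j → j < id → pvBreakAt d a id j = false := by
      intro j hj1 hj2
      by_contra hb
      have hb' : pvBreakAt d a id j = true := by simpa using hb
      rw [pvBreakAt, Bool.and_eq_true, beq_iff_eq, beq_iff_eq] at hb'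
      have : j ∈ pvKs d a id := (pv_mem_pvKs d a id j).mpr
        ⟨pv_match_mem_keys d j _ hb'.1, by omega, hj2, hb'.1, hb'.2⟩
      have := hmax j this
      omega
    have hw0 : max 0 (id - ((d.size : Int) + 1)) ≤ m ∨
        max 0 (id - ((d.size : Int) + 1)) = 0 := by
      by_cases hcase : max 0 (id - ((d.size : Int) + 1)) ≤ m
      · exact Or.inl hcase
      · -- window bottom above m: then the window has no match at all, force bottom = 0
        right
        push_neg at hcase
        have hnomatchW : ∀ k, k ∈ PySem.List.pyRange (max 0 (id - ((d.size : Int) + 1))) id 1 →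
            pvBreakAt d a id k = false := by
          intro k hk
          rw [PySem.List.mem_pyRange_one] at hk
          exact hnomatch k (by omega) hk.2
        have hsafeW := pv_vok_at d a id hvok hnomatchW
        rcases pv_window_bottom d a id hnd (fun j hj => (hsafeW j hj).1) with hw | hid
        · exact hw
        · omega
    have hwm : max 0 (id - ((d.size : Int) + 1)) ≤ m := by
      rcases hw0 with h | h
      · exact h
      · omega
    have hnomatchW : ∀ k, k ∈ PySem.List.pyRange (max 0 (id - ((d.size : Int) + 1))) id 1 →
        m < k → pvBreakAt d a id k = false := by
      intro k hk hmk2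
      rw [PySem.List.mem_pyRange_one] at hk
      exact hnomatch k hmk2 hk.2
    -- safety for the rows strictly above m
    have hsafeAbove : ∀ j, m < j → j ≤ id - 1 →
        (∃ lbl, d.get? j = some lbl ∧
          (lbl = "K" → ∃ v, a.get? (j, id) = some v ∧ v ≠ 1)) := by
      intro j hj1 hj2
      have hjW : j ∈ PySem.List.pyRange (max 0 (id - ((d.size : Int) + 1))) id 1 := by
        rw [PySem.List.mem_pyRange_one]
        omega
      rw [pvVOk, List.all_eq_true] at hvok
      have hv := hvok j hjW
      have hany : ((PySem.List.pyRange (max 0 (id - ((d.size : Int) + 1))) id 1).any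
          (fun k => decide (j < k) && pvBreakAt d a id k)) = false := by
        rw [List.any_eq_false]
        intro k hk
        by_cases hjk : j < k
        · rw [hnomatchW k hk (by omega)]
          simp
        · simp [hjk]
      rw [hany, Bool.false_or, Bool.and_eq_true, Bool.and_eq_true] at hv
      obtain ⟨⟨hsome, himp⟩, -⟩ := hv
      cases hg : d.get? j with
      | none => rw [hg] at hsome; exact absurd hsome (by simp)
      | some lbl =>
        refine ⟨lbl, rfl, fun hK => ?_⟩
        subst hK
        rw [hg] at himp
        simp only [beq_self_eq_true, Bool.not_true, Bool.false_or] at himp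
        cases ha : a.get? (j, id) with
        | none => rw [ha] at himp; exact absurd himp (by simp)
        | some v =>
          refine ⟨v, rfl, fun hv1 => ?_⟩
          subst hv1
          have hb : pvBreakAt d a id j = true := by
            rw [pvBreakAt, hg, ha]; simp
          rw [hnomatch j hj1 (by omega)] at hb
          exact Bool.noConfusion hb
    rw [pv_find_break d a r2b id m ⟨hmK, hma⟩ hm0 ((id - 1) + 1).toNat (id - 1) (le_refl _)
        (by omega) hsafeAbove]
    rfl

-- ---- row_2_blk is stable / monotone along B's first pass ----

theorem pv_r2b_stable (d : PySem.Dict Int String) :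
    ∀ (l : List (Int × String))
      (s : (PySem.Dict Int (List Int)) × (PySem.Dict Int String) × Int × (PySem.Dict Int Int))
      (i b : Int),
      s.2.2.2.get? i = some b → (∀ row ∈ l, row.1 ≠ i) →
      ((l.foldl (pvStepB d) s).2.2.2).get? i = some b := by
  intro l
  induction l with
  | nil => intro s i b h _; exact h
  | cons row rest ih =>
    intro s i b h hav
    obtain ⟨blk, bt, bid, r2b⟩ := s
    obtain ⟨rid, rl⟩ := row
    have hne : rid ≠ i := hav (rid, rl) (by simp)
    rw [List.foldl_cons]
    apply ih _ i b _ (fun r hr => hav r (by simp [hr]))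
    simp only [pvStepB]
    split_ifs <;>
      simp_all [PySem.Dict.get?_insert_of_ne _ _ (fun hh => hne hh.symm)]

theorem pv_r2b_contains (d : PySem.Dict Int String) :
    ∀ (l : List (Int × String))
      (s : (PySem.Dict Int (List Int)) × (PySem.Dict Int String) × Int × (PySem.Dict Int Int))
      (i : Int),
      ((i, "K") ∈ l ∨ s.2.2.2.contains i = true) →
      ((l.foldl (pvStepB d) s).2.2.2).contains i = true := by
  intro l
  induction l with
  | nil =>
    intro s i h
    rcases h with h | h
    · simp at h
    · exact h
  | cons row rest ih =>
    intro s i h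
    obtain ⟨blk, bt, bid, r2b⟩ := s
    obtain ⟨rid, rl⟩ := row
    rw [List.foldl_cons]
    rcases h with h | h
    · rcases List.mem_cons.mp h with h | h
      · apply ih _ i (Or.inr _)
        have hr : rid = i ∧ rl = "K" := by
          constructor <;> [exact congrArg Prod.fst h.symm; exact congrArg Prod.snd h.symm]
        simp only [pvStepB, hr.2]
        simp [hr.1]
      · exact ih _ i (Or.inl h)
    · apply ih _ i (Or.inr _)
      simp only [pvStepB]
      split_ifs <;> simp_all [PySem.Dict.contains_insert]

-- ---- the backward search does not depend on WHICH row_2_blk snapshot is used,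
-- ---- provided the two snapshots agree at reachable break rows ----

def pvNoStop (d : PySem.Dict Int String) (a : PySem.Dict (Int × Int) Int) (id j : Int) : Prop :=
  ∃ lbl, d.get? j = some lbl ∧ (lbl = "K" → ∃ v, a.get? (j, id) = some v ∧ v ≠ 1)

theorem pv_find_congr (d : PySem.Dict Int String) (a : PySem.Dict (Int × Int) Int)
    (r1 r2 : PySem.Dict Int Int) (id : Int)
    (HB : ∀ i : Int, 0 ≤ i → i < id → d.get? i = some "K" → a.get? (i, id) = some 1 →
      (∀ j, i < j → j < id → pvNoStop d a id j) → r1.get? i = r2.get? i) :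
    ∀ (n : Nat) (i : Int), (i + 1).toNat ≤ n → i < id →
      (∀ j, i < j → j < id → pvNoStop d a id j) →
      pvFindB d a r1 id i = pvFindB d a r2 id i := by
  intro n
  induction n with
  | zero =>
    intro i hi hlt hup
    have h0 : i < 0 := by omega
    conv_lhs => rw [pvFindB]
    conv_rhs => rw [pvFindB]
    simp [h0]
  | succ n ih =>
    intro i hi hlt hup
    conv_lhs => rw [pvFindB]
    conv_rhs => rw [pvFindB]
    by_cases h0 : i < 0
    · simp [h0]
    · simp only [if_neg h0]
      cases hd : d.get? i with
      | none => rfl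
      | some lbl =>
        by_cases hK : lbl = "K"
        · simp only [if_pos hK]
          cases ha : a.get? (i, id) with
          | none => rfl
          | some v =>
            by_cases hv : v = 1
            · simp only [if_pos hv]
              exact HB i (by omega) hlt (hK ▸ hd) (hv ▸ ha) hup
            · simp only [if_neg hv]
              apply ih (i - 1) (by omega) (by omega)
              intro j hj1 hj2
              by_cases hji : j = i
              · exact ⟨lbl, hji ▸ hd, fun hKK => ⟨v, hji ▸ ha, hv⟩⟩
              · exact hup j (by omega) hj2
        · simp only [if_neg hK]
          apply ih (i - 1) (by omega) (by omega)
          intro j hj1 hj2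
          by_cases hji : j = i
          · exact ⟨lbl, hji ▸ hd, fun hKK => absurd hKK hK⟩
          · exact hup j (by omega) hj2

-- ---- instrumentation bookkeeping ----

theorem pv_stepC_fst (d : PySem.Dict Int String) (a : PySem.Dict (Int × Int) Int) :
    ∀ (l : List (Int × String)) s p,
      (l.foldl (pvStepC d a) (s, p)).1 = l.foldl (pvStepB d) s := by
  intro l
  induction l with
  | nil => intro s p; rfl
  | cons row rest ih => intro s p; exact ih _ _

theorem pv_pend_acc (d : PySem.Dict Int String) (a : PySem.Dict (Int × Int) Int) :
    ∀ (l : List (Int × String)) s p,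
      (l.foldl (pvStepC d a) (s, p)).2 = p ++ (l.foldl (pvStepC d a) (s, [])).2 := by
  intro l
  induction l with
  | nil => intro s p; simp
  | cons row rest ih =>
    intro s p
    rw [List.foldl_cons, List.foldl_cons]
    show (rest.foldl (pvStepC d a) (pvStepB d s row, p ++ pvDelta d a s row)).2
        = p ++ (rest.foldl (pvStepC d a) (pvStepB d s row, [] ++ pvDelta d a s row)).2
    rw [ih (pvStepB d s row) (p ++ pvDelta d a s row),
        ih (pvStepB d s row) ([] ++ pvDelta d a s row)]
    simp

-- ---- single-step reduction lemmas ----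

theorem pv_stepA_K (d : PySem.Dict Int String) (a : PySem.Dict (Int × Int) Int)
    (blk : PySem.Dict Int (List Int)) (bt : PySem.Dict Int String) (bid : Int)
    (r2b : PySem.Dict Int Int) (rid : Int) :
    pvStepA d a (blk, bt, bid, r2b) (rid, "K")
      = ((blk.insert bid []).modify bid [] (fun l => l ++ [rid]),
         bt.insert bid "table", bid + 1, r2b.insert rid bid) := by
  simp [pvStepA]

theorem pv_stepA_V (d : PySem.Dict Int String) (a : PySem.Dict (Int × Int) Int)
    (blk : PySem.Dict Int (List Int)) (bt : PySem.Dict Int String) (bid : Int)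
    (r2b : PySem.Dict Int Int) (rid : Int) :
    pvStepA d a (blk, bt, bid, r2b) (rid, "V")
      = (pvScanA d a r2b blk rid (rid - 1), bt, bid, r2b) := by
  simp [pvStepA]

theorem pv_insert_modify_self {v2 : Type} (dd : PySem.Dict Int v2) (k : Int) (v d0 : v2)
    (f : v2 → v2) : (dd.insert k v).modify k d0 f = dd.insert k (f v) := by
  show (dd.insert k v).insert k (f ((dd.insert k v).getD k d0)) = _
  rw [PySem.Dict.getD_insert_self, PySem.Dict.insert_insert_self]

-- A's three-step KV block initialisation collapses to a single modify
theorem pv_condInit_modify (blk : PySem.Dict Int (List Int)) (bid : Int)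
    (f : List Int → List Int) :
    (if blk.contains bid then blk else blk.insert bid []).modify bid [] f
      = blk.modify bid [] f := by
  by_cases hc : blk.contains bid = true
  · rw [if_pos hc]
  · have hc' : blk.contains bid = false := by simpa using hc
    rw [if_neg hc, pv_insert_modify_self]
    show _ = blk.insert bid (f (blk.getD bid []))
    rw [PySem.Dict.getD_of_not_contains _ _ hc']

theorem pv_stepA_KV (d : PySem.Dict Int String) (a : PySem.Dict (Int × Int) Int)
    (blk : PySem.Dict Int (List Int)) (bt : PySem.Dict Int String) (bid : Int)
    (r2b : PySem.Dict Int Int) (rid : Int) :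
    pvStepA d a (blk, bt, bid, r2b) (rid, "KV")
      = (blk.modify bid [] (fun l => l ++ [rid]),
         bt.insert bid "kv",
         if rid + 1 < (d.size : Int) ∧ (d.getD (rid + 1) "" = "K" ∨ d.getD (rid + 1) "" = "V")
         then bid + 1 else bid,
         r2b) := by
  simp only [pvStepA, if_neg (by decide : ¬ ("KV" : String) = "K"),
             if_neg (by decide : ¬ ("KV" : String) = "V")]
  by_cases hc : blk.contains bid = true
  · simp only [hc, if_true]
    split_ifs <;> simp_all [pv_condInit_modify]
  · have hc' : blk.contains bid = false := by simpa using hc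
    have h2 : (blk.insert bid []).contains bid = true := by
      rw [PySem.Dict.contains_insert]; simp
    have hins : (blk.insert bid []).modify bid [] (fun l => l ++ [rid])
        = blk.modify bid [] (fun l => l ++ [rid]) := by
      rw [pv_insert_modify_self]
      show _ = blk.insert bid ((blk.getD bid []) ++ [rid])
      rw [PySem.Dict.getD_of_not_contains _ _ hc']
    split_ifs <;> simp_all

theorem pv_stepA_other (d : PySem.Dict Int String) (a : PySem.Dict (Int × Int) Int)
    (s : (PySem.Dict Int (List Int)) × (PySem.Dict Int String) × Int × (PySem.Dict Int Int))
    (rid : Int) (rl : String) (h1 : ¬ rl = "K") (h2 : ¬ rl = "V") (h3 : ¬ rl = "KV") :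
    pvStepA d a s (rid, rl) = s := by
  obtain ⟨blk, bt, bid, r2b⟩ := s
  simp [pvStepA, h1, h2, h3]

theorem pv_stepB_K (d : PySem.Dict Int String)
    (blk : PySem.Dict Int (List Int)) (bt : PySem.Dict Int String) (bid : Int)
    (r2b : PySem.Dict Int Int) (rid : Int) :
    pvStepB d (blk, bt, bid, r2b) (rid, "K")
      = (blk.insert bid [rid], bt.insert bid "table", bid + 1, r2b.insert rid bid) := by
  simp [pvStepB]

theorem pv_stepB_KV (d : PySem.Dict Int String)
    (blk : PySem.Dict Int (List Int)) (bt : PySem.Dict Int String) (bid : Int)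
    (r2b : PySem.Dict Int Int) (rid : Int) :
    pvStepB d (blk, bt, bid, r2b) (rid, "KV")
      = (blk.modify bid [] (fun l => l ++ [rid]),
         bt.insert bid "kv",
         if rid + 1 < (d.size : Int) ∧ (d.getD (rid + 1) "" = "K" ∨ d.getD (rid + 1) "" = "V")
         then bid + 1 else bid,
         r2b) := by
  simp [pvStepB]

theorem pv_stepB_other (d : PySem.Dict Int String)
    (s : (PySem.Dict Int (List Int)) × (PySem.Dict Int String) × Int × (PySem.Dict Int Int))
    (rid : Int) (rl : String) (h1 : ¬ rl = "K") (h3 : ¬ rl = "KV") :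
    pvStepB d s (rid, rl) = s := by
  obtain ⟨blk, bt, bid, r2b⟩ := s
  simp [pvStepB, h1, h3]

-- ---- A's interleaved loop equals B's instrumented first pass ----

theorem pv_mainA (d : PySem.Dict Int String) (a : PySem.Dict (Int × Int) Int) :
    ∀ (l : List (Int × String)) (blk2 : PySem.Dict Int (List Int))
      (bt : PySem.Dict Int String) (bid : Int) (r2b : PySem.Dict Int Int)
      (pend : List (Int × Int)),
      (∀ p ∈ pend, blk2.contains p.1 = true ∧ p.1 < bid) →
      (∀ v ∈ r2b.values, blk2.contains v = true ∧ v < bid) →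
      l.foldl (pvStepA d a) (pvApply pend blk2, bt, bid, r2b)
        = (pvApply ((l.foldl (pvStepC d a) ((blk2, bt, bid, r2b), pend)).2)
             ((l.foldl (pvStepC d a) ((blk2, bt, bid, r2b), pend)).1).1,
           ((l.foldl (pvStepC d a) ((blk2, bt, bid, r2b), pend)).1).2) := by
  intro l
  induction l with
  | nil => intro blk2 bt bid r2b pend hp hv; rfl
  | cons row rest ih =>
    intro blk2 bt bid r2b pend hp hv
    obtain ⟨rid, rl⟩ := row
    rw [List.foldl_cons, List.foldl_cons]
    have hpn : ∀ p ∈ pend, blk2.contains p.1 = true ∧ p.1 ≠ bid :=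
      fun p h => ⟨(hp p h).1, by have := (hp p h).2; omega⟩
    by_cases hK : rl = "K"
    · subst hK
      have hA : pvStepA d a (pvApply pend blk2, bt, bid, r2b) (rid, "K")
          = (pvApply pend (blk2.insert bid [rid]), bt.insert bid "table", bid + 1,
             r2b.insert rid bid) := by
        rw [pv_stepA_K, pv_insert_modify_self, pv_apply_insert pend blk2 bid [rid] hpn]
        simp
      have hC : pvStepC d a ((blk2, bt, bid, r2b), pend) (rid, "K")
          = ((blk2.insert bid [rid], bt.insert bid "table", bid + 1, r2b.insert rid bid), pend) := by
        show (pvStepB d (blk2, bt, bid, r2b) (rid, "K"),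
              pend ++ pvDelta d a (blk2, bt, bid, r2b) (rid, "K")) = _
        rw [pv_stepB_K]
        simp [pvDelta]
      rw [hA, hC]
      apply ih
      · intro p hpm
        obtain ⟨h1, h2⟩ := hp p hpm
        constructor
        · rw [PySem.Dict.contains_insert]; simp [h1]
        · omega
      · intro v hvm
        rcases PySem.Dict.mem_values_insert r2b _ _ _ hvm with h | h
        · subst h
          constructor
          · rw [PySem.Dict.contains_insert]; simp
          · omega
        · obtain ⟨h1, h2⟩ := hv v h
          constructor
          · rw [PySem.Dict.contains_insert]; simp [h1]
          · omega
    · by_cases hV : rl = "V"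
      · subst hV
        have hscan := pv_scan_eq_find d a r2b rid ((rid - 1) + 1).toNat (rid - 1) (le_refl _)
          (pvApply pend blk2)
        have hC : pvStepC d a ((blk2, bt, bid, r2b), pend) (rid, "V")
            = ((blk2, bt, bid, r2b), pend ++ pvDelta d a (blk2, bt, bid, r2b) (rid, "V")) := by
          show (pvStepB d (blk2, bt, bid, r2b) (rid, "V"), _) = _
          rw [pv_stepB_other d _ rid "V" (by decide) (by decide)]
        rw [pv_stepA_V, hscan, hC]
        cases hf : pvFindB d a r2b rid (rid - 1) with
        | none =>
          have hdel : pvDelta d a (blk2, bt, bid, r2b) (rid, "V") = [] := by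
            simp [pvDelta, hf]
          rw [hdel]
          simp only [pvApp1, List.append_nil]
          exact ih blk2 bt bid r2b pend hp hv
        | some b =>
          have hdel : pvDelta d a (blk2, bt, bid, r2b) (rid, "V") = [(b, rid)] := by
            simp [pvDelta, hf]
          have hbv : b ∈ r2b.values :=
            pv_find_mem d a r2b rid ((rid - 1) + 1).toNat (rid - 1) (le_refl _) b hf
          obtain ⟨hbc, hbl⟩ := hv b hbv
          have happ : pvApp1 (pvApply pend blk2) rid (some b)
              = pvApply (pend ++ [(b, rid)]) blk2 := by
            rw [pv_apply_append]
            rfl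
          rw [hdel, happ]
          apply ih
          · intro p hpm
            rcases List.mem_append.mp hpm with h | h
            · exact hp p h
            · simp at h
              subst h
              exact ⟨hbc, hbl⟩
          · exact hv
      · by_cases hKV : rl = "KV"
        · subst hKV
          have hA : pvStepA d a (pvApply pend blk2, bt, bid, r2b) (rid, "KV")
              = (pvApply pend (blk2.modify bid [] (fun l => l ++ [rid])),
                 bt.insert bid "kv",
                 if rid + 1 < (d.size : Int) ∧ (d.getD (rid + 1) "" = "K" ∨ d.getD (rid + 1) "" = "V")
                 then bid + 1 else bid,
                 r2b) := by
            rw [pv_stepA_KV, pv_apply_modify pend blk2 bid [] _ hpn]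
          have hC : pvStepC d a ((blk2, bt, bid, r2b), pend) (rid, "KV")
              = ((blk2.modify bid [] (fun l => l ++ [rid]),
                  bt.insert bid "kv",
                  if rid + 1 < (d.size : Int) ∧ (d.getD (rid + 1) "" = "K" ∨ d.getD (rid + 1) "" = "V")
                  then bid + 1 else bid,
                  r2b), pend) := by
            show (pvStepB d (blk2, bt, bid, r2b) (rid, "KV"), _) = _
            rw [pv_stepB_KV]
            simp [pvDelta]
          have hcsd : ∀ x, (blk2.modify bid [] (fun l => l ++ [rid])).contains x
              = (x == bid || blk2.contains x) := by
            intro x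
            rw [PySem.Dict.contains_modify]
          rw [hA, hC]
          apply ih
          · intro p hpm
            obtain ⟨h1, h2⟩ := hp p hpm
            refine ⟨?_, by split_ifs <;> omega⟩
            rw [hcsd]; simp [h1]
          · intro v hvm
            obtain ⟨h1, h2⟩ := hv v hvm
            refine ⟨?_, by split_ifs <;> omega⟩
            rw [hcsd]; simp [h1]
        · have hC : pvStepC d a ((blk2, bt, bid, r2b), pend) (rid, rl)
              = ((blk2, bt, bid, r2b), pend) := by
            show (pvStepB d (blk2, bt, bid, r2b) (rid, rl), _) = _
            rw [pv_stepB_other d _ rid rl hK hKV]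
            simp [pvDelta, hV]
          rw [pv_stepA_other d a _ rid rl hK hV hKV, hC]
          exact ih blk2 bt bid r2b pend hp hv

-- ---- at a reachable break row, the row_2_blk snapshot already carries its final value ----

theorem pv_HB (d : PySem.Dict Int String) (a : PySem.Dict (Int × Int) Int)
    (hnd : d.keys.Nodup) (id : Int) (hvok : pvVOk d a id = true)
    (pre l2 : List (Int × String)) (hsplit : d.items = pre ++ (id, "V") :: l2)
    (init : (PySem.Dict Int (List Int)) × (PySem.Dict Int String) × Int × (PySem.Dict Int Int)) :
    ∀ i : Int, 0 ≤ i → i < id → d.get? i = some "K" → a.get? (i, id) = some 1 →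
      (∀ j, i < j → j < id → pvNoStop d a id j) →
      ((pre.foldl (pvStepB d) init).2.2.2).get? i
        = ((d.items.foldl (pvStepB d) init).2.2.2).get? i := by
  intro i h0 hlt hdK ha1 hup
  -- every row from i up to id is a key of d
  have hkeys : ∀ j : Int, i ≤ j → j < id → j ∈ d.keys := by
    intro j hj1 hj2
    have hsome : (d.get? j).isSome = true := by
      rcases eq_or_lt_of_le hj1 with h | h
      · rw [← h, hdK]; rfl
      · obtain ⟨lbl, hl, -⟩ := hup j h hj2
        rw [hl]; rfl
    by_contra hnm
    rw [(PySem.Dict.get?_eq_none_iff_not_mem_keys d j).mpr hnm] at hsome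
    exact Bool.false_ne_true hsome
  -- hence the scanned stretch fits inside the window
  have hklen : d.keys.length = d.size := by simp [PySem.Dict.keys, PySem.Dict.size]
  have hsize : id - i ≤ (d.size : Int) := by
    have hsub : PySem.List.pyRange i id ⊆ d.keys := by
      intro x hx
      rw [PySem.List.mem_pyRange_one] at hx
      exact hkeys x hx.1 hx.2
    have hlen := ((PySem.List.nodup_pyRange_one i id).subperm hsub).length_le
    rw [PySem.List.length_pyRange_one] at hlen
    omega
  have hiw : i ∈ PySem.List.pyRange (max 0 (id - ((d.size : Int) + 1))) id := by
    rw [PySem.List.mem_pyRange_one]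
    omega
  -- read off the pvVOk conclusion at i
  rw [pvVOk, List.all_eq_true] at hvok
  have hvi := hvok i hiw
  have hany : ((PySem.List.pyRange (max 0 (id - ((d.size : Int) + 1))) id).any
      (fun k => decide (i < k) && pvBreakAt d a id k)) = false := by
    by_contra hx
    have hx' := Bool.of_not_eq_false hx
    obtain ⟨k, hkW, hk⟩ := List.any_eq_true.mp hx'
    rw [Bool.and_eq_true, decide_eq_true_iff] at hk
    obtain ⟨hik, hbk⟩ := hk
    rw [pvBreakAt, Bool.and_eq_true, beq_iff_eq, beq_iff_eq] at hbk
    have hkid : k < id := (PySem.List.mem_pyRange_one.mp hkW).2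
    obtain ⟨lbl, hl, himp⟩ := hup k hik hkid
    rw [hbk.1] at hl
    obtain ⟨v, hv, hvne⟩ := himp (Option.some.inj hl).symm
    rw [hbk.2] at hv
    exact hvne (Option.some.inj hv).symm
  rw [hany, Bool.false_or, Bool.and_eq_true, Bool.and_eq_true] at hvi
  have hbi : pvBreakAt d a id i = true := by
    rw [pvBreakAt, hdK, ha1]; rfl
  have hidx : List.idxOf i d.keys < List.idxOf id d.keys := by
    have h2 := hvi.2
    rw [hbi] at h2
    simpa using h2
  -- positions: id sits right after pre, so i lies inside pre
  have hkeq : d.keys = pre.map Prod.fst ++ id :: l2.map Prod.fst := by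
    show d.items.map Prod.fst = _
    rw [hsplit]
    simp
  have hndk := hnd
  rw [hkeq, List.nodup_append] at hndk
  obtain ⟨hnd1, hnd2, hdisj⟩ := hndk
  have hidnot : id ∉ pre.map Prod.fst := fun hmem => hdisj id hmem id (by simp) rfl
  have hidxid : List.idxOf id d.keys = (pre.map Prod.fst).length := by
    rw [hkeq, List.idxOf_append, if_neg hidnot, List.idxOf_cons_self]
    omega
  rw [hidxid] at hidx
  have himem : i ∈ pre.map Prod.fst := by
    by_contra hni
    rw [hkeq, List.idxOf_append, if_neg hni] at hidx
    omega
  obtain ⟨p, hpPre, hpfst⟩ := List.mem_map.mp himem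
  have hpItems : p ∈ d.items := by
    rw [hsplit]; exact List.mem_append_left _ hpPre
  have hpget : d.get? p.1 = some p.2 := by
    have : (p.1, p.2) ∈ d.items := by rw [Prod.mk.eta]; exact hpItems
    exact PySem.Dict.get?_of_mem_items d this hnd
  have hiK : (i, "K") ∈ pre := by
    rw [hpfst, hdK] at hpget
    have : p.2 = "K" := (Option.some.inj hpget).symm
    have hpe : p = (i, "K") := by
      rw [← hpfst, ← this]
    rw [← hpe]
    exact hpPre
  -- the snapshot after pre already contains i, and no later row overwrites it
  have hcont : ((pre.foldl (pvStepB d) init).2.2.2).contains i = true :=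
    pv_r2b_contains d pre init i (Or.inl hiK)
  obtain ⟨b, hb⟩ : ∃ b, ((pre.foldl (pvStepB d) init).2.2.2).get? i = some b := by
    have hiso := PySem.Dict.contains_eq_isSome_get? ((pre.foldl (pvStepB d) init).2.2.2) i
    rw [hcont] at hiso
    exact Option.isSome_iff_exists.mp hiso.symm
  have havoid : ∀ row ∈ (id, "V") :: l2, row.1 ≠ i := by
    intro row hrow heq
    have h1 : row.1 ∈ id :: l2.map Prod.fst := by
      rcases List.mem_cons.mp hrow with h | h
      · rw [h]; simp
      · exact List.mem_cons_of_mem _ (List.mem_map.mpr ⟨row, h, rfl⟩)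
    exact hdisj i himem row.1 h1 heq.symm
  rw [hsplit, List.foldl_append, hb,
      pv_r2b_stable d ((id, "V") :: l2) (pre.foldl (pvStepB d) init) i b hb havoid]

-- ---- B's second pass replays exactly the pending appends ----

theorem pv_pass2 (d : PySem.Dict Int String) (a : PySem.Dict (Int × Int) Int)
    (hnd : d.keys.Nodup)
    (hpre : ∀ p ∈ d.items, p.2 = "V" → pvVOk d a p.1 = true)
    (init : (PySem.Dict Int (List Int)) × (PySem.Dict Int String) × Int × (PySem.Dict Int Int)) :
    ∀ (l pre : List (Int × String)) (blk : PySem.Dict Int (List Int)),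
      d.items = pre ++ l →
      l.foldl (pvStepV d a ((d.items.foldl (pvStepB d) init).2.2.2)) blk
        = pvApply ((l.foldl (pvStepC d a) ((pre.foldl (pvStepB d) init), [])).2) blk := by
  intro l
  induction l with
  | nil => intro pre blk _; rfl
  | cons row rest ih =>
    intro pre blk hsplit
    obtain ⟨rid, rl⟩ := row
    rw [List.foldl_cons, List.foldl_cons]
    have hsplit' : d.items = (pre ++ [(rid, rl)]) ++ rest := by
      rw [hsplit, List.append_assoc]; rfl
    by_cases hV : rl = "V"
    · subst hV
      have hmemV : (rid, "V") ∈ d.items := by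
        rw [hsplit]; exact List.mem_append_right _ (by simp)
      have hvok : pvVOk d a rid = true := hpre (rid, "V") hmemV rfl
      have hfind : pvFindB d a ((pre.foldl (pvStepB d) init).2.2.2) rid (rid - 1)
          = pvFindB d a ((d.items.foldl (pvStepB d) init).2.2.2) rid (rid - 1) := by
        apply pv_find_congr d a _ _ rid
          (fun i hi0 hilt hiK hia hup =>
            pv_HB d a hnd rid hvok pre rest hsplit init i hi0 hilt hiK hia hup)
          ((rid - 1) + 1).toNat (rid - 1) (le_refl _) (by omega)
        intro j hj1 hj2
        omega
      have hmax := pv_find_eq_max d a ((d.items.foldl (pvStepB d) init).2.2.2) rid hnd hvok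
      have hstepB : pvStepB d (pre.foldl (pvStepB d) init) (rid, "V")
          = pre.foldl (pvStepB d) init :=
        pv_stepB_other d _ rid "V" (by decide) (by decide)
      have hpre' : (pre ++ [(rid, "V")]).foldl (pvStepB d) init = pre.foldl (pvStepB d) init := by
        rw [List.foldl_append, List.foldl_cons, List.foldl_nil, hstepB]
      have hC : pvStepC d a ((pre.foldl (pvStepB d) init), []) (rid, "V")
          = ((pre.foldl (pvStepB d) init),
             pvDelta d a (pre.foldl (pvStepB d) init) (rid, "V")) := by
        show (pvStepB d (pre.foldl (pvStepB d) init) (rid, "V"), [] ++ _) = _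
        rw [hstepB, List.nil_append]
      rw [hC, pv_pend_acc d a rest (pre.foldl (pvStepB d) init)
            (pvDelta d a (pre.foldl (pvStepB d) init) (rid, "V")),
          pv_apply_append]
      have hattach : pvStepV d a ((d.items.foldl (pvStepB d) init).2.2.2) blk (rid, "V")
          = pvApply (pvDelta d a (pre.foldl (pvStepB d) init) (rid, "V")) blk := by
        have h1 : pvStepV d a ((d.items.foldl (pvStepB d) init).2.2.2) blk (rid, "V")
            = pvApp1 blk rid ((PySem.List.max? (pvKs d a rid) (fun x => x)).bind
                ((d.items.foldl (pvStepB d) init).2.2.2).get?) := by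
          simp [pvStepV]
        rw [h1, ← hmax, ← hfind]
        cases hf : pvFindB d a ((pre.foldl (pvStepB d) init).2.2.2) rid (rid - 1) with
        | none => simp [pvDelta, hf, pvApp1, pvApply]
        | some b => simp [pvDelta, hf, pvApp1, pvApply]
      rw [hattach]
      have := ih (pre ++ [(rid, "V")]) (pvApply (pvDelta d a (pre.foldl (pvStepB d) init) (rid, "V")) blk) hsplit'
      rw [hpre'] at this
      exact this
    · have hstepB2 : pvStepB d (pre.foldl (pvStepB d) init) (rid, rl)
          = (pre ++ [(rid, rl)]).foldl (pvStepB d) init := by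
        rw [List.foldl_append, List.foldl_cons, List.foldl_nil]
      have hC : pvStepC d a ((pre.foldl (pvStepB d) init), []) (rid, rl)
          = ((pre ++ [(rid, rl)]).foldl (pvStepB d) init, []) := by
        show (pvStepB d (pre.foldl (pvStepB d) init) (rid, rl), [] ++ _) = _
        rw [hstepB2]
        simp [pvDelta, hV]
      have hattach : pvStepV d a ((d.items.foldl (pvStepB d) init).2.2.2) blk (rid, rl)
          = blk := by
        rw [pvStepV]
        simp [hV]
      rw [hC, hattach]
      exact ih (pre ++ [(rid, rl)]) blk hsplit'

-- ---- Pre_ hands the V-row condition to the proof ----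

theorem pv_pre_V (rls : List (Int × String)) (row_align : List (Int × Int × Int))
    (h : Pre_block_seperation rls row_align) :
    ∀ p ∈ (PySem.Dict.ofList rls).items, p.2 = "V" →
      pvVOk (PySem.Dict.ofList rls)
        (PySem.Dict.ofList (row_align.map (fun t => ((t.1, t.2.1), t.2.2)))) p.1 = true := by
  unfold Pre_block_seperation pvPre at h
  rw [List.all_eq_true] at h
  intro p hp hV
  have h3 := h p hp
  rw [Bool.and_eq_true] at h3
  have h2 := h3.2
  rw [hV] at h2
  simpa using h2

-- ===== VERDICT (by name: the statement is the Claim_ definition above) =====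
theorem block_seperation_spec : Claim_equal_block_seperation := by
  intro rls ra hdom hpre
  unfold Spec_block_seperation
  have hpv := pv_pre_V rls ra hpre
  set D := PySem.Dict.ofList rls with hD
  set A := PySem.Dict.ofList (ra.map (fun t => ((t.1, t.2.1), t.2.2))) with hA
  have hnd : D.keys.Nodup := PySem.Dict.nodup_keys_ofList rls
  have hmain := pv_mainA D A D.items (PySem.Dict.mk []) (PySem.Dict.mk []) 0 (PySem.Dict.mk [])
    [] (by simp) (by intro v hv; simp [PySem.Dict.values] at hv)
  rw [show pvApply ([] : List (Int × Int)) (PySem.Dict.mk []) = PySem.Dict.mk [] from rfl] at hmain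
  rcases hSB : D.items.foldl (pvStepB D) (PySem.Dict.mk [], PySem.Dict.mk [], 0, PySem.Dict.mk [])
    with ⟨blkB, btB, bidB, r2bB⟩
  have hC1 : (D.items.foldl (pvStepC D A) ((PySem.Dict.mk [], PySem.Dict.mk [], 0, PySem.Dict.mk []), [])).1
      = (blkB, btB, bidB, r2bB) := by
    rw [pv_stepC_fst D A D.items (PySem.Dict.mk [], PySem.Dict.mk [], 0, PySem.Dict.mk []) []]
    exact hSB
  have hp2 := pv_pass2 D A hnd hpv (PySem.Dict.mk [], PySem.Dict.mk [], 0, PySem.Dict.mk [])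
    D.items [] blkB (by simp)
  rw [List.foldl_nil] at hp2
  rw [hSB] at hp2
  rw [hC1] at hmain
  show block_seperation rls ra = block_seperation_alt rls ra
  unfold block_seperation block_seperation_alt
  dsimp only
  rw [← hD, ← hA, hmain]
  rw [pvPass1_eq D D.items (PySem.Dict.mk []) (PySem.Dict.mk []) 0 (PySem.Dict.mk []), hSB]
  dsimp only
  rw [pvPass2_eq D A r2bB D.items blkB, hp2]
  rw [pvMeta2_eq]
  rfl
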